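-- pv_equiv track=rewrite | github.com/robotmlg/aoc | 2025/09/main.py | part2
-- ===== SOURCE A (Python) =====
-- from math import prod
-- from itertools import combinations
--
-- def area(a, b):
--     return prod([abs(a[i] - b[i]) + 1 for i in range(len(a))])
--
-- def part2(red_tiles):
--     min_width = min([p[0] for p in red_tiles])
--     min_height = min([p[1] for p in red_tiles])
--     width = max([p[0] for p in red_tiles])
--     height = max([p[1] for p in red_tiles])
--
--     all_tiles = set(red_tiles)
--     # for each red pair, add the line between
--     red_pairs = []
--     for i in range(len(red_tiles)):
--         red_pairs.append((red_tiles[i], red_tiles[(i+1) % len(red_tiles)]))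
--     for a, b in red_pairs:
--         if a[0] == b[0]:
--             all_tiles |= set([(a[0], i) for i in range(min(a[1], b[1]), max(a[1], b[1]))])
--         elif a[1] == b[1]:
--             all_tiles |= set([(i, a[1]) for i in range(min(a[0], b[0]), max(a[0], b[0]))])
--
--     def rect_in(edges, a, b):
--         width = min(a[0], b[0]), max(a[0], b[0])
--         height = min(a[1], b[1]), max(a[1], b[1])
--
--         # check if any edges are in the interior of the rect
--         for e in edges:
--             if (
--                 width[0] < e[0] < width[1] and
--                 height[0] < e[1] < height[1]
--             ):
--                 return False
--
--         return True
--
--     pairs = combinations(red_tiles, 2)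
--     valid_pairs = [pair for pair in sorted(pairs) if rect_in(all_tiles, *pair)]
--     areas = [area(*p) for p in valid_pairs]
--     return max(areas)
-- ===== SOURCE B (Python) =====
-- def part2(red_tiles):
--     n = len(red_tiles)
--     # analytic segment descriptors: (vertical?, fixed coord, lo, hi) covering
--     # the integer points of the boundary line between consecutive red tiles
--     segs = []
--     for i in range(n):
--         a = red_tiles[i]
--         b = red_tiles[(i + 1) % n]
--         if a[0] == b[0]:
--             segs.append((True, a[0], min(a[1], b[1]), max(a[1], b[1]) - 1))
--         elif a[1] == b[1]:
--             segs.append((False, a[1], min(a[0], b[0]), max(a[0], b[0]) - 1))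
--
--     def empty_interior(a, b):
--         w0, w1 = min(a[0], b[0]), max(a[0], b[0])
--         h0, h1 = min(a[1], b[1]), max(a[1], b[1])
--         for (x, y) in red_tiles:
--             if w0 < x < w1 and h0 < y < h1:
--                 return False
--         for (vert, c, lo, hi) in segs:
--             if vert:
--                 if w0 < c < w1 and max(lo, h0 + 1) <= min(hi, h1 - 1):
--                     return False
--             else:
--                 if h0 < c < h1 and max(lo, w0 + 1) <= min(hi, w1 - 1):
--                     return False
--         return True
--
--     best = None
--     rest = red_tiles
--     while rest:
--         a, rest = rest[0], rest[1:]
--         for b in rest: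
--             if empty_interior(a, b):
--                 ar = (abs(a[0] - b[0]) + 1) * (abs(a[1] - b[1]) + 1)
--                 if best is None or ar > best:
--                     best = ar
--     return best
-- ===== Notes on version B (the rewrite author's own statement) =====
-- stated objective: faster
-- what changed: B never materializes the boundary tiles: instead of building the set of every integer point on each edge and scanning it per pair, B keeps one analytic descriptor per axis-aligned edge and answers each interior-emptiness query by interval arithmetic, tracking a running maximum instead of sort+filter+map+max.
import Mathlib
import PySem

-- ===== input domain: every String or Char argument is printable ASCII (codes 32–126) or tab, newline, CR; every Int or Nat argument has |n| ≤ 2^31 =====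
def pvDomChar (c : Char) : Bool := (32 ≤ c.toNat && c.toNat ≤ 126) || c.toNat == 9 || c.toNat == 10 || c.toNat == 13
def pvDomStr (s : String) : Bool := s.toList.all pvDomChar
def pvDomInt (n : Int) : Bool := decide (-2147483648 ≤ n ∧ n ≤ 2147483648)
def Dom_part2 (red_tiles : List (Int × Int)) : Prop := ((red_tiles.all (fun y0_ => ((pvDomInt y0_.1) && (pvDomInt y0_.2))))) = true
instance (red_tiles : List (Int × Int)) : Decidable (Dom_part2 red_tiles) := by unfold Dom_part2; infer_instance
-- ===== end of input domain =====

-- B replaces A's materialized edge-tile set by per-edge interval arithmetic and a running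
-- maximum; measurably faster when the boundary edges are long. Equivalence is on the return
-- value (neither program mutates its argument).

-- ===== PORT A =====
-- area(a, b) = prod([abs(a[i]-b[i])+1 for i in range(len(a))]) on 2-tuples
def areaA (a b : Int × Int) : Int :=
  ([|a.1 - b.1| + 1, |a.2 - b.2| + 1] : List Int).prod

-- hand port of list(itertools.combinations(xs, 2)) as pairs, in CPython's order (exact)
def comb2 {α : Type} : List α → List (α × α)
  | [] => []
  | x :: xs => xs.map (fun y => (x, y)) ++ comb2 xs

-- rect_in(edges, a, b): the for-loop with early 'return False' is 'no element passes the test'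
def rectIn (edges : List (Int × Int)) (a b : Int × Int) : Bool :=
  !(edges.any (fun e =>
    decide (min a.1 b.1 < e.1 ∧ e.1 < max a.1 b.1 ∧ min a.2 b.2 < e.2 ∧ e.2 < max a.2 b.2)))

def part2 (red_tiles : List (Int × Int)) : Int :=
  let _min_width := PySem.List.min? (red_tiles.map (fun p => p.1)) (fun x => x)
  let _min_height := PySem.List.min? (red_tiles.map (fun p => p.2)) (fun x => x)
  let _width := PySem.List.max? (red_tiles.map (fun p => p.1)) (fun x => x)
  let _height := PySem.List.max? (red_tiles.map (fun p => p.2)) (fun x => x)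
  let n : Int := red_tiles.length
  let red_pairs : List ((Int × Int) × (Int × Int)) :=
    (PySem.List.pyRange 0 n 1).foldl (fun acc i =>
      acc ++ [(PySem.List.pyGetD red_tiles i (0, 0),
               PySem.List.pyGetD red_tiles (PySem.Int.mod (i + 1) n) (0, 0))]) []
  let all_tiles : PySem.Set (Int × Int) :=
    red_pairs.foldl (fun s p =>
      if p.1.1 == p.2.1 then
        PySem.Set.union s (PySem.Set.ofList
          ((PySem.List.pyRange (min p.1.2 p.2.2) (max p.1.2 p.2.2) 1).map (fun i => (p.1.1, i))))
      else if p.1.2 == p.2.2 then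
        PySem.Set.union s (PySem.Set.ofList
          ((PySem.List.pyRange (min p.1.1 p.2.1) (max p.1.1 p.2.1) 1).map (fun i => (i, p.1.2))))
      else s) (PySem.Set.ofList red_tiles)
  -- sorted(pairs): Python's lexicographic tuple order, via the Lex order on products
  let valid_pairs := (PySem.List.sorted (comb2 red_tiles)
      (fun p => toLex (toLex (p.1.1, p.1.2), toLex (p.2.1, p.2.2))) false).filter
      (fun p => rectIn all_tiles p.1 p.2)
  let areas := valid_pairs.map (fun p => areaA p.1 p.2)
  (PySem.List.max? areas (fun x => x)).getD 0   -- max(areas); none (= Python ValueError) only outside Pre_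

-- ===== PORT B =====
-- empty_interior(a, b) of Source B: scan the red tiles, then the analytic segment descriptors
def emptyInterior (red_tiles : List (Int × Int)) (segs : List (Bool × Int × Int × Int))
    (a b : Int × Int) : Bool :=
  (!(red_tiles.any (fun e =>
      decide (min a.1 b.1 < e.1 ∧ e.1 < max a.1 b.1 ∧ min a.2 b.2 < e.2 ∧ e.2 < max a.2 b.2)))) &&
  (!(segs.any (fun s =>
      if s.1 then
        decide (min a.1 b.1 < s.2.1 ∧ s.2.1 < max a.1 b.1 ∧
          max s.2.2.1 (min a.2 b.2 + 1) ≤ min s.2.2.2 (max a.2 b.2 - 1))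
      else
        decide (min a.2 b.2 < s.2.1 ∧ s.2.1 < max a.2 b.2 ∧
          max s.2.2.1 (min a.1 b.1 + 1) ≤ min s.2.2.2 (max a.1 b.1 - 1)))))

-- the 'while rest: a, rest = rest[0], rest[1:] …' loop with its running best
def bestLoop (red_tiles : List (Int × Int)) (segs : List (Bool × Int × Int × Int)) :
    List (Int × Int) → Option Int → Option Int
  | [], best => best
  | a :: rest, best =>
      bestLoop red_tiles segs rest
        (rest.foldl (fun best b =>
          if emptyInterior red_tiles segs a b then
            let ar := (|a.1 - b.1| + 1) * (|a.2 - b.2| + 1)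
            match best with
            | none => some ar
            | some m => if ar > m then some ar else some m
          else best) best)

def part2_alt (red_tiles : List (Int × Int)) : Int :=
  let n : Int := red_tiles.length
  let segs : List (Bool × Int × Int × Int) :=
    (PySem.List.pyRange 0 n 1).foldl (fun acc i =>
      let a := PySem.List.pyGetD red_tiles i (0, 0)
      let b := PySem.List.pyGetD red_tiles (PySem.Int.mod (i + 1) n) (0, 0)
      if a.1 == b.1 then acc ++ [(true, a.1, min a.2 b.2, max a.2 b.2 - 1)]
      else if a.2 == b.2 then acc ++ [(false, a.2, min a.1 b.1, max a.1 b.1 - 1)]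
      else acc) []
  (bestLoop red_tiles segs red_tiles none).getD 0   -- 'return best'; None only outside Pre_

-- ===== PRECONDITION & SPEC =====
-- Pre_ excludes only the inputs where A raises: with fewer than two tiles, min() (empty list)
-- or max(areas) (no pair) raises ValueError; with ≥ 2 tiles a pair of minimal bounding-box
-- area always has an empty interior, so max(areas) is defined.
def Pre_part2 (red_tiles : List (Int × Int)) : Prop := 2 ≤ red_tiles.length
instance (red_tiles : List (Int × Int)) : Decidable (Pre_part2 red_tiles) := by
  unfold Pre_part2; infer_instance
def pvWitness_part2 : (List (Int × Int)) := [(0, 0), (2, 3)]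

def Spec_part2 (red_tiles : List (Int × Int)) (out : Int) : Prop := out = part2_alt red_tiles
instance (red_tiles : List (Int × Int)) (out : Int) : Decidable (Spec_part2 red_tiles out) := by
  unfold Spec_part2; infer_instance

-- ===== CLAIM (what is proved, stated in full; the proofs are below) =====
def Claim_equal_part2 : Prop := ∀ (red_tiles : List (Int × Int)), Dom_part2 red_tiles →
  Pre_part2 red_tiles → Spec_part2 red_tiles (part2 red_tiles)

-- ===== LEMMAS AND PROOFS =====

-- proof-side vocabulary ----------------------------------------------------
def pairAt (rt : List (Int × Int)) (i : Int) : (Int × Int) × (Int × Int) :=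
  (PySem.List.pyGetD rt i (0, 0),
   PySem.List.pyGetD rt (PySem.Int.mod (i + 1) (rt.length : Int)) (0, 0))

def redPairs (rt : List (Int × Int)) : List ((Int × Int) × (Int × Int)) :=
  (PySem.List.pyRange 0 (rt.length : Int) 1).map (pairAt rt)

-- the tiles A's loop adds for one consecutive pair
def segPts (p : (Int × Int) × (Int × Int)) : List (Int × Int) :=
  if p.1.1 = p.2.1 then
    (PySem.List.pyRange (min p.1.2 p.2.2) (max p.1.2 p.2.2) 1).map (fun i => (p.1.1, i))
  else if p.1.2 = p.2.2 then
    (PySem.List.pyRange (min p.1.1 p.2.1) (max p.1.1 p.2.1) 1).map (fun i => (i, p.1.2))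
  else []

-- the descriptors B's loop appends for one consecutive pair
def segDescr (p : (Int × Int) × (Int × Int)) : List (Bool × Int × Int × Int) :=
  if p.1.1 = p.2.1 then [(true, p.1.1, min p.1.2 p.2.2, max p.1.2 p.2.2 - 1)]
  else if p.1.2 = p.2.2 then [(false, p.1.2, min p.1.1 p.2.1, max p.1.1 p.2.1 - 1)]
  else []

def hitP (a b e : Int × Int) : Prop :=
  min a.1 b.1 < e.1 ∧ e.1 < max a.1 b.1 ∧ min a.2 b.2 < e.2 ∧ e.2 < max a.2 b.2

def segHitP (a b : Int × Int) : Bool × Int × Int × Int → Prop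
  | (true, c, lo, hi) =>
      min a.1 b.1 < c ∧ c < max a.1 b.1 ∧ max lo (min a.2 b.2 + 1) ≤ min hi (max a.2 b.2 - 1)
  | (false, c, lo, hi) =>
      min a.2 b.2 < c ∧ c < max a.2 b.2 ∧ max lo (min a.1 b.1 + 1) ≤ min hi (max a.1 b.1 - 1)

def optMax (o : Option Int) (v : Int) : Option Int :=
  match o with
  | none => some v
  | some m => if v > m then some v else some m

def areaB (q : (Int × Int) × (Int × Int)) : Int :=
  (|q.1.1 - q.2.1| + 1) * (|q.1.2 - q.2.2| + 1)

def cands (p : (Int × Int) → (Int × Int) → Bool) : List (Int × Int) → List Int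
  | [] => []
  | a :: rest => (rest.filter (p a)).map (fun b => areaB (a, b)) ++ cands p rest

-- per-pair: scanning the materialized points equals the interval test -------
theorem segPts_hit_iff (p : (Int × Int) × (Int × Int)) (a b : Int × Int) :
    (∃ e ∈ segPts p, hitP a b e) ↔ (∃ s ∈ segDescr p, segHitP a b s) := by
  unfold segPts segDescr
  split_ifs with h1 h2
  · simp only [List.mem_map, PySem.List.mem_pyRange_one, hitP, segHitP, List.mem_singleton]
    constructor
    · rintro ⟨e, ⟨y, ⟨hy1, hy2⟩, rfl⟩, hx1, hx2, hy3, hy4⟩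
      exact ⟨_, rfl, by omega⟩
    · rintro ⟨s, rfl, hc1, hc2, hc3⟩
      exact ⟨(p.1.1, max (min p.1.2 p.2.2) (min a.2 b.2 + 1)), ⟨_, by omega, rfl⟩, by dsimp; omega⟩
  · simp only [List.mem_map, PySem.List.mem_pyRange_one, hitP, segHitP, List.mem_singleton]
    constructor
    · rintro ⟨e, ⟨y, ⟨hy1, hy2⟩, rfl⟩, hx1, hx2, hy3, hy4⟩
      exact ⟨_, rfl, by omega⟩
    · rintro ⟨s, rfl, hc1, hc2, hc3⟩
      exact ⟨(max (min p.1.1 p.2.1) (min a.1 b.1 + 1), p.1.2), ⟨_, by omega, rfl⟩, by dsimp; omega⟩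
  · simp

-- membership in A's folded tile set ----------------------------------------
theorem mem_setFold (l : List ((Int × Int) × (Int × Int))) (s : PySem.Set (Int × Int))
    (e : Int × Int) :
    e ∈ l.foldl (fun s p =>
      if p.1.1 == p.2.1 then
        PySem.Set.union s (PySem.Set.ofList
          ((PySem.List.pyRange (min p.1.2 p.2.2) (max p.1.2 p.2.2) 1).map (fun i => (p.1.1, i))))
      else if p.1.2 == p.2.2 then
        PySem.Set.union s (PySem.Set.ofList
          ((PySem.List.pyRange (min p.1.1 p.2.1) (max p.1.1 p.2.1) 1).map (fun i => (i, p.1.2))))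
      else s) s ↔ e ∈ s ∨ ∃ p ∈ l, e ∈ segPts p := by
  induction l generalizing s with
  | nil => simp
  | cons p t ih =>
    rw [List.foldl_cons, ih, List.exists_mem_cons_iff]
    simp only [beq_iff_eq, segPts]
    split_ifs with h1 h2
    · rw [PySem.Set.mem_union, PySem.Set.mem_ofList]; tauto
    · rw [PySem.Set.mem_union, PySem.Set.mem_ofList]; tauto
    · simp
  

-- B's segs loop builds the flatMap of descriptors ---------------------------
theorem segsFold_eq (rt : List (Int × Int)) :
    (PySem.List.pyRange 0 (rt.length : Int) 1).foldl (fun acc i =>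
      let a := PySem.List.pyGetD rt i (0, 0)
      let b := PySem.List.pyGetD rt (PySem.Int.mod (i + 1) (rt.length : Int)) (0, 0)
      if a.1 == b.1 then acc ++ [(true, a.1, min a.2 b.2, max a.2 b.2 - 1)]
      else if a.2 == b.2 then acc ++ [(false, a.2, min a.1 b.1, max a.1 b.1 - 1)]
      else acc) [] = (redPairs rt).flatMap segDescr := by
  have key : ∀ (L : List Int) (acc : List (Bool × Int × Int × Int)),
      L.foldl (fun acc i =>
        let a := PySem.List.pyGetD rt i (0, 0)
        let b := PySem.List.pyGetD rt (PySem.Int.mod (i + 1) (rt.length : Int)) (0, 0)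
        if a.1 == b.1 then acc ++ [(true, a.1, min a.2 b.2, max a.2 b.2 - 1)]
        else if a.2 == b.2 then acc ++ [(false, a.2, min a.1 b.1, max a.1 b.1 - 1)]
        else acc) acc = acc ++ (L.map (pairAt rt)).flatMap segDescr := by
    intro L
    induction L with
    | nil => intro acc; simp
    | cons i t ih =>
      intro acc
      rw [List.foldl_cons, ih, List.map_cons, List.flatMap_cons]
      simp only [beq_iff_eq, segDescr, pairAt]
      split_ifs <;> simp
  rw [key, List.nil_append, redPairs]

theorem segHit_decide (a b : Int × Int) (s : Bool × Int × Int × Int) :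
    ((if s.1 then
        decide (min a.1 b.1 < s.2.1 ∧ s.2.1 < max a.1 b.1 ∧
          max s.2.2.1 (min a.2 b.2 + 1) ≤ min s.2.2.2 (max a.2 b.2 - 1))
      else
        decide (min a.2 b.2 < s.2.1 ∧ s.2.1 < max a.2 b.2 ∧
          max s.2.2.1 (min a.1 b.1 + 1) ≤ min s.2.2.2 (max a.1 b.1 - 1))) = true)
    ↔ segHitP a b s := by
  rcases s with ⟨bb, c, lo, hi⟩
  cases bb <;> simp [segHitP]

-- the central point: A's emptiness test equals B's --------------------------
theorem rectIn_eq_empty (rt : List (Int × Int)) (a b : Int × Int) :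
    rectIn ((redPairs rt).foldl (fun s p =>
      if p.1.1 == p.2.1 then
        PySem.Set.union s (PySem.Set.ofList
          ((PySem.List.pyRange (min p.1.2 p.2.2) (max p.1.2 p.2.2) 1).map (fun i => (p.1.1, i))))
      else if p.1.2 == p.2.2 then
        PySem.Set.union s (PySem.Set.ofList
          ((PySem.List.pyRange (min p.1.1 p.2.1) (max p.1.1 p.2.1) 1).map (fun i => (i, p.1.2))))
      else s) (PySem.Set.ofList rt)) a b
    = emptyInterior rt ((redPairs rt).flatMap segDescr) a b := by
  unfold rectIn emptyInterior
  rw [← Bool.not_or]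
  refine congrArg (fun t => !t) ?_
  rw [Bool.eq_iff_iff]
  simp only [List.any_eq_true, Bool.or_eq_true, decide_eq_true_eq, mem_setFold,
    PySem.Set.mem_ofList, List.mem_flatMap, segHit_decide]
  constructor
  · rintro ⟨e, he, hhit⟩
    rcases he with he | ⟨p, hp, hseg⟩
    · exact Or.inl ⟨e, he, hhit⟩
    · obtain ⟨sdesc, hs1, hs2⟩ := (segPts_hit_iff p a b).1 ⟨e, hseg, hhit⟩
      exact Or.inr ⟨sdesc, ⟨p, hp, hs1⟩, hs2⟩
  · rintro (⟨e, he, hhit⟩ | ⟨sdesc, ⟨p, hp, hs1⟩, hs2⟩)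
    · exact ⟨e, Or.inl he, hhit⟩
    · obtain ⟨e, he1, he2⟩ := (segPts_hit_iff p a b).2 ⟨sdesc, hs1, hs2⟩
      exact ⟨e, Or.inr ⟨p, hp, he1⟩, he2⟩

-- the candidate areas, comb2 formulation ------------------------------------
theorem cands_eq_comb2 (p : (Int × Int) → (Int × Int) → Bool) (l : List (Int × Int)) :
    cands p l = ((comb2 l).filter (fun q => p q.1 q.2)).map areaB := by
  induction l with
  | nil => rfl
  | cons a rest ih =>
    rw [cands, comb2, List.filter_append, List.map_append, ih, List.filter_map, List.map_map]
    rfl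

-- B's while-loop is a fold of optMax over the candidate areas ---------------
theorem bestLoop_eq (rt : List (Int × Int)) (segs : List (Bool × Int × Int × Int))
    (l : List (Int × Int)) (best : Option Int) :
    bestLoop rt segs l best = (cands (emptyInterior rt segs) l).foldl optMax best := by
  induction l generalizing best with
  | nil => rfl
  | cons a rest ih =>
    rw [bestLoop, ih, cands, List.foldl_append]
    congr 1
    rw [PySem.List.foldl_if_eq_foldl_filter, List.foldl_map]
    apply PySem.List.foldl_congr_mem
    intro acc b _
    cases acc <;> rfl

theorem foldl_optMax_some (t : List Int) (m : Int) :
    t.foldl optMax (some m) = some (t.foldl max m) := by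
  induction t generalizing m with
  | nil => rfl
  | cons x t ih =>
    rw [List.foldl_cons, List.foldl_cons, show optMax (some m) x = some (max m x) by
      simp only [optMax]; split_ifs <;> (congr 1; omega), ih]

theorem foldl_optMax_eq_max? (l : List Int) :
    l.foldl optMax none = PySem.List.max? l (fun x => x) := by
  cases l with
  | nil => rfl
  | cons x t => rw [PySem.List.max?_id_cons, List.foldl_cons, show optMax none x = some x from rfl,
      foldl_optMax_some]

theorem max?_id_perm {l₁ l₂ : List Int} (h : l₁.Perm l₂) :
    PySem.List.max? l₁ (fun x => x) = PySem.List.max? l₂ (fun x => x) := by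
  by_cases hnil : l₁ = []
  · have h2 : l₂ = [] := List.Perm.eq_nil (hnil ▸ h : ([] : List Int).Perm l₂).symm
    rw [hnil, h2]
  · have h2 : l₂ ≠ [] := fun e => hnil (List.Perm.eq_nil (e ▸ h))
    obtain ⟨m1, hm1⟩ : ∃ m, PySem.List.max? l₁ (fun x => x) = some m := by
      cases hc : PySem.List.max? l₁ (fun x => x) with
      | none => exact absurd ((PySem.List.max?_eq_none_iff _ _).1 hc) hnil
      | some m => exact ⟨m, rfl⟩
    obtain ⟨m2, hm2⟩ : ∃ m, PySem.List.max? l₂ (fun x => x) = some m := by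
      cases hc : PySem.List.max? l₂ (fun x => x) with
      | none => exact absurd ((PySem.List.max?_eq_none_iff _ _).1 hc) h2
      | some m => exact ⟨m, rfl⟩
    rw [hm1, hm2]
    exact congrArg some (le_antisymm
      (PySem.List.max?_isMax hm2 m1 (h.mem_iff.1 (PySem.List.max?_mem hm1)))
      (PySem.List.max?_isMax hm1 m2 (h.mem_iff.2 (PySem.List.max?_mem hm2))))

theorem areaA_eq (p : (Int × Int) × (Int × Int)) : areaA p.1 p.2 = areaB p := by
  simp [areaA, areaB]

theorem part2_eq_alt (red_tiles : List (Int × Int)) : part2 red_tiles = part2_alt red_tiles := by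
  simp only [part2, part2_alt]
  rw [PySem.List.foldl_append_singleton_eq_map, List.nil_append]
  rw [show (List.map (fun i => (PySem.List.pyGetD red_tiles i (0, 0),
        PySem.List.pyGetD red_tiles (PySem.Int.mod (i + 1) (red_tiles.length : Int)) (0, 0)))
        (PySem.List.pyRange 0 (red_tiles.length : Int) 1)) = redPairs red_tiles from rfl]
  rw [segsFold_eq, bestLoop_eq, foldl_optMax_eq_max?]
  rw [List.filter_congr (fun p _ => rectIn_eq_empty red_tiles p.1 p.2)]
  rw [cands_eq_comb2]
  rw [List.map_congr_left (fun p _ => areaA_eq p)]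
  congr 1
  exact max?_id_perm (((PySem.List.sorted_perm (comb2 red_tiles) _ false).filter _).map areaB)

-- ===== VERDICT (by name: the statement is the Claim_ definition above) =====
theorem part2_spec : Claim_equal_part2 := by
  intro red_tiles _ _
  unfold Spec_part2
  exact part2_eq_alt red_tiles
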